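-- pv_equiv track=rewrite | github.com/FanfeiLi/nanochat | data_prep/gen_arith_k5.py | fmt_cot_mul
-- ===== SOURCE A (Python) =====
-- OP_SYMBOLS = {"add": "+", "sub": "-", "mul": "×", "div": "÷"}
--
-- def fmt_plain_int(a: int, b: int, op_name: str) -> tuple[str, str]:
--     sym = OP_SYMBOLS[op_name]
--     if op_name == "div":
--         q, r = divmod(a, b)
--         u = f"What is {a} {sym} {b}?"
--         if r == 0:
--             return u, f"{a} {sym} {b} = {q}"
--         return u, f"{a} {sym} {b} = {q} remainder {r}"
--     res = {"add": a + b, "sub": a - b, "mul": a * b}[op_name]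
--     return f"What is {a} {sym} {b}?", f"{a} {sym} {b} = {res}"
--
-- def fmt_cot_mul(a: int, b: int) -> tuple[str, str]:
--     """Step-by-step multiplication: split smaller operand into place values."""
--     if b > a:
--         a, b = b, a  # ensure a >= b for cleaner steps
--     if b < 10:
--         return fmt_plain_int(a, b, "mul")
--     digits = [int(c) for c in str(b)]
--     parts = []
--     running = 0
--     for i, d in enumerate(digits):
--         place = 10 ** (len(digits) - 1 - i)
--         chunk = a * d * place
--         if d != 0:
--             parts.append(f"{a} × {d * place} = {chunk}")
--         running += chunk
--     final = a * b
--     steps = "; ".join(parts)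
--     return (f"Multiply {a} × {b}.",
--             f"{steps}; sum = {final}. So {a} × {b} = {final}.")
-- ===== SOURCE B (Python) =====
-- def fmt_cot_mul(a: int, b: int) -> tuple[str, str]:
--     """Greedy decomposition: repeatedly strip the leading place-value component of the smaller factor."""
--     hi, lo = (a, b) if a >= b else (b, a)
--     if lo < 10:
--         return f"What is {hi} \u00d7 {lo}?", f"{hi} \u00d7 {lo} = {hi * lo}"
--     parts = []
--     n = lo
--     while n:
--         p = 1
--         while p * 10 <= n:
--             p *= 10
--         dp = n // p * p
--         parts.append(f"{hi} \u00d7 {dp} = {hi * dp}")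
--         n -= dp
--     final = hi * lo
--     steps = "; ".join(parts)
--     return (f"Multiply {hi} \u00d7 {lo}.",
--             f"{steps}; sum = {final}. So {hi} \u00d7 {lo} = {final}.")
-- ===== Notes on version B (the rewrite author's own statement) =====
-- stated objective: alternative
-- what changed: Replaces the str(b) digit-list + enumerate/place-from-index loop by a greedy repeated-subtraction decomposition: each iteration finds the largest power of 10 not exceeding the remainder, emits the leading place-value component, and subtracts it, so lines come out MSB-first with no digit list, no zero-digit test and no index arithmetic.
import Mathlib
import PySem

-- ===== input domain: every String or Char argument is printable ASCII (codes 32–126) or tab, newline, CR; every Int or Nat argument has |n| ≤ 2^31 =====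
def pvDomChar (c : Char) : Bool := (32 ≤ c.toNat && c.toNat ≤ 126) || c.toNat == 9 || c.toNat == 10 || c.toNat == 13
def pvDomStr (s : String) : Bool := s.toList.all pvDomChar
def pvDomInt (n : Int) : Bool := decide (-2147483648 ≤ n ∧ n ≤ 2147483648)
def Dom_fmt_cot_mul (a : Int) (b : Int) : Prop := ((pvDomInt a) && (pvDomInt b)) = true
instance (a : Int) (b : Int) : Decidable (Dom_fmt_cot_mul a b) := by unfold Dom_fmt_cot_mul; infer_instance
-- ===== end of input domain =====

-- B replaces A's str(b) digit-list + enumerate/place-from-index loop by a greedy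
-- repeated-subtraction decomposition (strip the leading place-value component) — alternative.


-- ===== PORT A =====
def OP_SYMBOLS : PySem.Dict String String :=
  ⟨[("add", "+"), ("sub", "-"), ("mul", "×"), ("div", "÷")]⟩

def fmt_plain_int (a : Int) (b : Int) (op_name : String) : String × String :=
  -- OP_SYMBOLS[op_name]: KeyError impossible at the call sites shown (op_name is always a key)
  let sym := (PySem.Dict.get? OP_SYMBOLS op_name).getD ""
  if op_name = "div" then
    -- divmod(a, b): ZeroDivisionError would need b = 0; this branch is only reached with op_name = "div"
    let qr := (PySem.Int.divmod? a b).getD (0, 0)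
    let u := "What is " ++ PySem.Int.toStr a ++ " " ++ sym ++ " " ++ PySem.Int.toStr b ++ "?"
    if qr.2 = 0 then
      (u, PySem.Int.toStr a ++ " " ++ sym ++ " " ++ PySem.Int.toStr b ++ " = " ++ PySem.Int.toStr qr.1)
    else
      (u, PySem.Int.toStr a ++ " " ++ sym ++ " " ++ PySem.Int.toStr b ++ " = " ++ PySem.Int.toStr qr.1
          ++ " remainder " ++ PySem.Int.toStr qr.2)
  else
    -- {"add": a+b, "sub": a-b, "mul": a*b}[op_name] — literal lookup in the three-key dict
    let res := if op_name = "add" then a + b else if op_name = "sub" then a - b else a * b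
    ("What is " ++ PySem.Int.toStr a ++ " " ++ sym ++ " " ++ PySem.Int.toStr b ++ "?",
     PySem.Int.toStr a ++ " " ++ sym ++ " " ++ PySem.Int.toStr b ++ " = " ++ PySem.Int.toStr res)

-- the loop body of A's `for i, d in enumerate(digits)` (state: (parts, running))
def stepA (a : Int) (digits : List Int) (st : List String × Int) (p : Int × Int) :
    List String × Int :=
  -- place = 10 ** (len(digits) - 1 - i); the exponent is ≥ 0 since i < len(digits)
  let place : Int := (10 : Int) ^ ((PySem.List.len digits - 1 - p.1).toNat)
  let chunk := a * p.2 * place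
  (if p.2 ≠ 0 then
     st.1 ++ [PySem.Int.toStr a ++ " × " ++ PySem.Int.toStr (p.2 * place) ++ " = "
              ++ PySem.Int.toStr chunk]
   else st.1,
   st.2 + chunk)

def fmt_cot_mul (a : Int) (b : Int) : String × String :=
  let p := if b > a then (b, a) else (a, b)   -- if b > a: a, b = b, a
  let a := p.1
  let b := p.2
  if b < 10 then fmt_plain_int a b "mul"
  else
    -- digits = [int(c) for c in str(b)]; here b ≥ 10 so every c is '0'..'9' (int(c) never raises)
    let digits : List Int :=
      (PySem.Int.toChars b).map (fun c => (PySem.Int.ofStr? (String.singleton c)).getD 0)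
    let st := (PySem.List.enumerate digits).foldl (stepA a digits) ([], 0)
    let final := a * b
    let steps := PySem.Str.join "; " st.1
    ("Multiply " ++ PySem.Int.toStr a ++ " × " ++ PySem.Int.toStr b ++ ".",
     steps ++ "; sum = " ++ PySem.Int.toStr final ++ ". So " ++ PySem.Int.toStr a ++ " × "
       ++ PySem.Int.toStr b ++ " = " ++ PySem.Int.toStr final ++ ".")

-- ===== PORT B =====
-- Source B's inner `p = 1; while p * 10 <= n: p *= 10` (largest power of 10 ≤ n);
-- the `0 < p` conjunct is only a totality guard (always true: pw is called with p = 1)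
def pw (n : Nat) (p : Nat) : Nat :=
  if h : 0 < p ∧ p * 10 ≤ n then pw n (p * 10) else p
termination_by n - p
decreasing_by omega

-- termination facts for the outer `while n:` loop: 0 < pw n 1 ≤ n when 0 < n
theorem pw_pos_le (n : Nat) : ∀ p, 0 < p → p ≤ n → 0 < pw n p ∧ pw n p ≤ n := by
  intro p
  induction p using pw.induct n with
  | case1 p h ih =>
    intro _ _
    rw [pw, dif_pos h]
    exact ih (by omega) h.2
  | case2 p h =>
    intro hp hpn
    rw [pw, dif_neg h]
    exact ⟨hp, hpn⟩

-- Source B's outer `while n:` loop: strip the leading place-value component each iteration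
def bLead (hi : Int) (n : Nat) : List String :=
  if _hn : n = 0 then []
  else
    -- p = largest power of 10 ≤ n; dp = n // p * p (the leading component), written inline
    (PySem.Int.toStr hi ++ " × " ++ PySem.Int.toStr ((n / pw n 1 * pw n 1 : Nat) : Int) ++ " = "
      ++ PySem.Int.toStr (hi * ((n / pw n 1 * pw n 1 : Nat) : Int)))
      :: bLead hi (n - n / pw n 1 * pw n 1)
decreasing_by
  have h := pw_pos_le n 1 one_pos (by omega)
  have : 0 < n / pw n 1 := Nat.div_pos h.2 h.1
  have : 0 < n / pw n 1 * pw n 1 := Nat.mul_pos this h.1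
  omega

def fmt_cot_mul_alt (a : Int) (b : Int) : String × String :=
  let p := if a ≥ b then (a, b) else (b, a)
  let hi := p.1
  let lo := p.2
  if lo < 10 then
    ("What is " ++ PySem.Int.toStr hi ++ " × " ++ PySem.Int.toStr lo ++ "?",
     PySem.Int.toStr hi ++ " × " ++ PySem.Int.toStr lo ++ " = " ++ PySem.Int.toStr (hi * lo))
  else
    let parts := bLead hi lo.toNat   -- greedy loop, MSB-first already
    let final := hi * lo
    let steps := PySem.Str.join "; " parts
    ("Multiply " ++ PySem.Int.toStr hi ++ " × " ++ PySem.Int.toStr lo ++ ".",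
     steps ++ "; sum = " ++ PySem.Int.toStr final ++ ". So " ++ PySem.Int.toStr hi ++ " × "
       ++ PySem.Int.toStr lo ++ " = " ++ PySem.Int.toStr final ++ ".")

-- ===== PRECONDITION & SPEC =====
def Spec_fmt_cot_mul (a : Int) (b : Int) (out : String × String) : Prop := out = fmt_cot_mul_alt a b
instance (a : Int) (b : Int) (out : String × String) : Decidable (Spec_fmt_cot_mul a b out) := by
  unfold Spec_fmt_cot_mul; infer_instance

-- ===== CLAIM (what is proved, stated in full; the proofs are below) =====
def Claim_equal_fmt_cot_mul : Prop := ∀ (a : Int) (b : Int), Dom_fmt_cot_mul a b → Spec_fmt_cot_mul a b (fmt_cot_mul a b)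

-- ===== LEMMAS AND PROOFS =====

-- one step line, as both ports print it
def mkL (hi d place : Int) : String :=
  PySem.Int.toStr hi ++ " × " ++ PySem.Int.toStr (d * place) ++ " = "
    ++ PySem.Int.toStr (hi * d * place)

-- lines LSB-first with a growing place
def linesOf (hi place : Int) : List Int → List String
  | [] => []
  | d :: t => (if d ≠ 0 then [mkL hi d place] else []) ++ linesOf hi (place * 10) t

-- lines MSB-first, place from the length of the remaining tail (A's traversal order)
def downP (hi p : Int) : List Int → List String
  | [] => []
  | d :: t => (if d ≠ 0 then [mkL hi d (p * (10 : Int) ^ t.length)] else []) ++ downP hi p t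

-- the parts list A's indexed loop produces, abstractly
def gLines (g : Int × Int → String) : List Int → Int → List String
  | [], _ => []
  | d :: t, k => (if d ≠ 0 then [g (k, d)] else []) ++ gLines g t (k + 1)

theorem downP_append (hi p : Int) (d : Int) :
    ∀ xs, downP hi p (xs ++ [d]) =
      downP hi (p * 10) xs ++ (if d ≠ 0 then [mkL hi d p] else []) := by
  intro xs
  induction xs with
  | nil => simp [downP]
  | cons x xs ih =>
    simp only [List.cons_append, downP, ih, List.length_append, List.length_cons,
      List.length_nil, List.append_assoc]
    have h : p * (10 : Int) ^ (xs.length + (0 + 1)) = p * 10 * (10 : Int) ^ xs.length := by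
      ring
    rw [h]

theorem downP_reverse (hi : Int) :
    ∀ (t : List Int) (p : Int), downP hi p t.reverse = (linesOf hi p t).reverse := by
  intro t
  induction t with
  | nil => intro p; simp [downP, linesOf]
  | cons d t ih =>
    intro p
    simp only [List.reverse_cons, downP_append, linesOf, List.reverse_append]
    rw [ih (p * 10)]
    split_ifs <;> simp

theorem fold_fst (g : Int × Int → String)
    (f : (List String × Int) → (Int × Int) → (List String × Int))
    (hf : ∀ st p, (f st p).1 = if p.2 ≠ 0 then st.1 ++ [g p] else st.1) :
    ∀ (s : List Int) (k : Int) (st : List String × Int),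
      ((PySem.List.enumerate s k).foldl f st).1 = st.1 ++ gLines g s k := by
  intro s
  induction s with
  | nil => intro k st; simp [PySem.List.enumerate_nil, gLines]
  | cons d t ih =>
    intro k st
    rw [PySem.List.enumerate_cons, List.foldl_cons, ih, gLines, hf]
    split_ifs <;> simp

theorem gLines_eq_downP (hi LInt : Int) :
    ∀ (s : List Int) (k : Int), k + (s.length : Int) = LInt →
      gLines (fun p => mkL hi p.2 ((10 : Int) ^ ((LInt - 1 - p.1).toNat))) s k
        = downP hi 1 s := by
  intro s
  induction s with
  | nil => intro k _; rfl
  | cons d t ih =>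
    intro k hk
    simp only [List.length_cons] at hk
    push_cast at hk
    have he : LInt - 1 - k = (t.length : Int) := by omega
    rw [gLines, downP, he, Int.toNat_natCast, ih (k + 1) (by omega), one_mul]

-- str(m) for 0 < m is the base-10 digit characters, most significant first
theorem toDigitsCore_eq (f : Nat) :
    ∀ (n : Nat) (acc : List Char), 0 < n → n < f →
      Nat.toDigitsCore 10 f n acc = ((Nat.digits 10 n).map Nat.digitChar).reverse ++ acc := by
  induction f with
  | zero => intro n acc _ h; omega
  | succ f ih =>
    intro n acc hn hf
    rw [Nat.toDigitsCore]
    by_cases h : n / 10 = 0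
    · rw [if_pos h, Nat.digits_def' (by norm_num : 1 < 10) hn, h]
      simp
    · rw [if_neg h, ih (n / 10) _ (Nat.pos_of_ne_zero h)
        (by have := Nat.div_lt_self hn (by omega : 1 < 10); omega),
        Nat.digits_def' (by norm_num : 1 < 10) hn]
      simp

theorem toChars_pos (m : Nat) (hm : 0 < m) :
    PySem.Int.toChars (m : Int) = ((Nat.digits 10 m).map Nat.digitChar).reverse := by
  rw [PySem.Int.toChars, if_neg (by omega), Int.toNat_natCast, Nat.toDigits,
    toDigitsCore_eq (m + 1) m [] hm (by omega), List.append_nil]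

theorem int_of_digitChar : ∀ d < 10,
    (PySem.Int.ofStr? (String.singleton (Nat.digitChar d))).getD 0 = (d : Int) := by decide

-- folding the " {sym} " pieces of A's plain format into B's literal " × "
theorem symfold (Y : String) : (" " : String) ++ ("×" ++ (" " ++ Y)) = " × " ++ Y := by
  rw [← String.append_assoc, ← String.append_assoc]
  rfl

-- ===== B-side characterisation: the greedy loop produces the MSB-first digit lines =====

theorem linesOf_append (hi place : Int) :
    ∀ u v, linesOf hi place (u ++ v) =
      linesOf hi place u ++ linesOf hi (place * (10 : Int) ^ u.length) v := by
  intro u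
  induction u generalizing place with
  | nil => intro v; simp [linesOf]
  | cons d t ih =>
    intro v
    simp only [List.cons_append, linesOf, ih (place * 10), List.length_cons, List.append_assoc]
    have h : place * 10 * (10 : Int) ^ t.length = place * (10 : Int) ^ (t.length + 1) := by ring
    rw [h]

theorem linesOf_replicate_zero (hi place : Int) (z : Nat) :
    linesOf hi place (List.replicate z 0) = [] := by
  induction z generalizing place with
  | zero => rfl
  | succ z ih => simp [List.replicate_succ, linesOf, ih]

-- pw n p is a power-of-10 multiple of p squeezed around n
theorem pw_spec (n : Nat) : ∀ p, 0 < p → p ≤ n →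
    (∃ j, pw n p = p * 10 ^ j) ∧ pw n p ≤ n ∧ n < pw n p * 10 := by
  intro p
  induction p using pw.induct n with
  | case1 p h ih =>
    intro _ _
    rw [pw, dif_pos h]
    obtain ⟨⟨j, hj⟩, h2, h3⟩ := ih (by omega) h.2
    exact ⟨⟨j + 1, by rw [hj]; ring⟩, h2, h3⟩
  | case2 p h =>
    intro hp hpn
    rw [pw, dif_neg h]
    exact ⟨⟨0, by ring⟩, hpn, by omega⟩

-- digits of r + d * 10^k (0 < d < 10, r < 10^k): digits of r, zero padding, leading digit d
theorem digits_split : ∀ (k d r : Nat), 0 < d → d < 10 → r < 10 ^ k →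
    Nat.digits 10 (r + d * 10 ^ k)
      = Nat.digits 10 r ++ List.replicate (k - (Nat.digits 10 r).length) 0 ++ [d] := by
  intro k
  induction k with
  | zero =>
    intro d r hd hd10 hr
    interval_cases r
    simp [Nat.digits_def' (by norm_num : 1 < 10) hd, Nat.div_eq_of_lt hd10,
      Nat.mod_eq_of_lt hd10]
  | succ k ih =>
    intro d r hd hd10 hr
    have hpos : 0 < r + d * 10 ^ (k + 1) := by positivity
    rw [Nat.digits_def' (by norm_num : 1 < 10) hpos]
    have hmod : (r + d * 10 ^ (k + 1)) % 10 = r % 10 := by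
      have : d * 10 ^ (k + 1) = d * 10 ^ k * 10 := by ring
      omega
    have hdiv : (r + d * 10 ^ (k + 1)) / 10 = r / 10 + d * 10 ^ k := by
      have : d * 10 ^ (k + 1) = d * 10 ^ k * 10 := by ring
      omega
    rw [hmod, hdiv, ih d (r / 10) hd hd10 (by
      have : r / 10 * 10 ≤ r := Nat.div_mul_le_self r 10
      have h2 : 10 ^ (k + 1) = 10 ^ k * 10 := by ring
      omega)]
    by_cases hr0 : r = 0
    · subst hr0
      simp [List.replicate_succ]
    · rw [Nat.digits_def' (by norm_num : 1 < 10) (Nat.pos_of_ne_zero hr0)]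
      have hlen : (Nat.digits 10 r).length = (Nat.digits 10 (r / 10)).length + 1 := by
        rw [Nat.digits_def' (by norm_num : 1 < 10) (Nat.pos_of_ne_zero hr0)]; rfl
      simp [hlen]

-- r < 10^k → the digit list of r fits in k places
theorem digits_len_le_of_lt (r k : Nat) (hr : r < 10 ^ k) : (Nat.digits 10 r).length ≤ k := by
  by_cases hr0 : r = 0
  · subst hr0; simp
  · by_contra h
    have h1 : 10 ^ (Nat.digits 10 r).length ≤ 10 * r :=
      Nat.base_pow_length_digits_le 10 r (by norm_num) hr0
    have h2 : 10 ^ (k + 1) ≤ 10 ^ (Nat.digits 10 r).length :=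
      Nat.pow_le_pow_right (by norm_num) (by omega)
    have h3 : 10 ^ (k + 1) = 10 * 10 ^ k := by ring
    omega

-- the greedy loop equals the reversed LSB-first digit lines
theorem bLead_eq (hi : Int) :
    ∀ n : Nat, bLead hi n = (linesOf hi 1 ((Nat.digits 10 n).map (Nat.cast : ℕ → ℤ))).reverse := by
  intro n
  induction n using Nat.strong_induction_on with
  | _ n ih =>
    by_cases hn : n = 0
    · subst hn; simp [bLead, linesOf]
    · have hn1 : 1 ≤ n := Nat.one_le_iff_ne_zero.mpr hn
      obtain ⟨⟨j, hj⟩, hle, hlt⟩ := pw_spec n 1 one_pos hn1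
      rw [one_mul] at hj
      have hppos : 0 < pw n 1 := by rw [hj]; positivity
      have hdpos : 0 < n / pw n 1 := Nat.div_pos hle hppos
      have hd10 : n / pw n 1 < 10 := Nat.div_lt_of_lt_mul hlt
      have hrp : n % pw n 1 < 10 ^ j := hj ▸ Nat.mod_lt n hppos
      have hsub : n % pw n 1 + n / pw n 1 * pw n 1 = n := Nat.mod_add_div' n (pw n 1)
      have hdign : Nat.digits 10 n
          = Nat.digits 10 (n % pw n 1)
            ++ List.replicate (j - (Nat.digits 10 (n % pw n 1)).length) 0
            ++ [n / pw n 1] := by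
        calc Nat.digits 10 n
            = Nat.digits 10 (n % pw n 1 + n / pw n 1 * 10 ^ j) := by rw [← hj, hsub]
          _ = _ := digits_split j (n / pw n 1) (n % pw n 1) hdpos hd10 hrp
      have hsubpos : 0 < n / pw n 1 * pw n 1 := Nat.mul_pos hdpos hppos
      rw [bLead, dif_neg hn]
      rw [ih (n - n / pw n 1 * pw n 1) (by omega),
        show n - n / pw n 1 * pw n 1 = n % pw n 1 from by omega,
        hdign]
      have hlenr := digits_len_le_of_lt (n % pw n 1) j hrp
      rw [List.map_append, List.map_append, List.map_replicate, List.map_singleton,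
        Nat.cast_zero, linesOf_append, linesOf_append, linesOf_replicate_zero]
      simp only [linesOf, List.append_nil, List.length_append,
        List.length_map, List.length_replicate, one_mul]
      rw [if_pos (show ((n / pw n 1 : Nat) : Int) ≠ 0 from by exact_mod_cast hdpos.ne'),
        show (Nat.digits 10 (n % pw n 1)).length + (j - (Nat.digits 10 (n % pw n 1)).length) = j
          from by omega]
      have hline : PySem.Int.toStr hi ++ " × " ++ PySem.Int.toStr ((n / pw n 1 * pw n 1 : Nat) : Int)
            ++ " = " ++ PySem.Int.toStr (hi * ((n / pw n 1 * pw n 1 : Nat) : Int))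
          = mkL hi ((n / pw n 1 : Nat) : Int) ((10 : Int) ^ j) := by
        unfold mkL
        rw [show ((n / pw n 1 * pw n 1 : Nat) : Int)
              = ((n / pw n 1 : Nat) : Int) * (10 : Int) ^ j from by push_cast [hj]; ring,
          mul_assoc]
      rw [hline]
      simp [List.reverse_append]

-- the parts list A's loop builds equals B's greedy list (ordered pair, lo ≥ 10)
theorem parts_eq (hi lo : Int) (h10 : 10 ≤ lo) (digits : List Int)
    (hdigits : digits =
      (PySem.Int.toChars lo).map (fun c => (PySem.Int.ofStr? (String.singleton c)).getD 0)) :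
    ((PySem.List.enumerate digits).foldl (stepA hi digits) ([], 0)).1
      = bLead hi lo.toNat := by
  have hm : 0 < lo.toNat := by omega
  have hlo : lo = ((lo.toNat : Nat) : Int) := by omega
  have hdig : digits = ((Nat.digits 10 lo.toNat).map (Nat.cast : ℕ → ℤ)).reverse := by
    rw [hdigits, hlo, toChars_pos _ hm, List.map_reverse, List.map_map]
    congr 1
    refine List.map_congr_left (fun d hd => ?_)
    exact int_of_digitChar d (Nat.digits_lt_base (by norm_num) hd)
  rw [fold_fst (fun p => mkL hi p.2 ((10 : Int) ^ ((PySem.List.len digits - 1 - p.1).toNat)))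
      (stepA hi digits) (fun st p => rfl),
    List.nil_append,
    gLines_eq_downP hi (PySem.List.len digits) digits 0 (by simp [PySem.List.len_eq]),
    hdig, downP_reverse, bLead_eq]

theorem ordered_eq (hi lo : Int) (h : lo ≤ hi) : fmt_cot_mul hi lo = fmt_cot_mul_alt hi lo := by
  unfold fmt_cot_mul fmt_cot_mul_alt
  rw [if_neg (by omega : ¬ lo > hi), if_pos (by omega : hi ≥ lo)]
  by_cases hlo : lo < 10
  · simp only [if_pos hlo]
    unfold fmt_plain_int
    rw [if_neg (by decide : ¬ ("mul" : String) = "div"),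
      if_neg (by decide : ¬ ("mul" : String) = "add"),
      if_neg (by decide : ¬ ("mul" : String) = "sub"),
      show (PySem.Dict.get? OP_SYMBOLS "mul").getD "" = "×" from by decide]
    simp only [String.append_assoc, symfold]
  · simp only [if_neg hlo]
    rw [parts_eq hi lo (by omega) _ rfl]

theorem A_comm (a b : Int) (h : a < b) : fmt_cot_mul a b = fmt_cot_mul b a := by
  unfold fmt_cot_mul
  rw [if_pos (by omega : b > a), if_neg (by omega : ¬ a > b)]

theorem alt_comm (a b : Int) (h : a < b) : fmt_cot_mul_alt a b = fmt_cot_mul_alt b a := by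
  unfold fmt_cot_mul_alt
  rw [if_neg (by omega : ¬ a ≥ b), if_pos (by omega : b ≥ a)]

-- ===== VERDICT (by name: the statement is the Claim_ definition above) =====
theorem fmt_cot_mul_spec : Claim_equal_fmt_cot_mul := by
  intro a b _
  unfold Spec_fmt_cot_mul
  by_cases h : b ≤ a
  · exact ordered_eq a b h
  · have h' : a < b := by omega
    rw [A_comm a b h', alt_comm a b h']
    exact ordered_eq b a (by omega)
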